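-- pv_equiv track=rewrite | github.com/SamuelEllertson/various-projects | sequences/sequences.py | balancedTernary
-- ===== SOURCE A (Python) =====
-- def balancedTernary(num):
--     ternary = baseConvert(num, 3)
--
--     total = 0
--     base = 1
--
--     for digit in ternary[::-1]:
--
--         if digit == "0":
--             pass
--         if digit == "1":
--             total += base
--         if digit == "2":
--             total -= base
--
--         base *= 3
--
--     return total
--
-- def baseConvert(n, base):
--     """convert positive decimal integer n to equivalent in another base (2-36)"""
--
--     digits = "0123456789abcdefghijklmnopqrstuvwxyz"
--
--     try:
--         n = int(n)
--         base = int(base)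
--     except:
--         return ""
--
--     if n < 0 or base < 2 or base > 36:
--         return ""
--
--     s = ""
--
--     while 1:
--         r = n % base
--         s = digits[r] + s
--         n = n // base
--         if n == 0:
--             break
--
--     return s
-- ===== SOURCE B (Python) =====
-- def balancedTernary(num):
--     try:
--         n = int(num)
--     except:
--         return 0
--     if n < 0:
--         return 0
--     total = 0
--     base = 1
--     while n > 0:
--         r = n % 3
--         if r == 1:
--             total += base
--         elif r == 2:
--             total -= base
--         base *= 3
--         n //= 3
--     return total
-- ===== Notes on version B (the rewrite author's own statement) =====
-- stated objective: simpler
-- what changed: B computes the balanced-ternary total in one arithmetic while-loop over num (add base on remainder 1, subtract on 2, base *= 3, n //= 3), instead of first building a base-3 digit string and then folding over its reversal.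
import Mathlib
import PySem

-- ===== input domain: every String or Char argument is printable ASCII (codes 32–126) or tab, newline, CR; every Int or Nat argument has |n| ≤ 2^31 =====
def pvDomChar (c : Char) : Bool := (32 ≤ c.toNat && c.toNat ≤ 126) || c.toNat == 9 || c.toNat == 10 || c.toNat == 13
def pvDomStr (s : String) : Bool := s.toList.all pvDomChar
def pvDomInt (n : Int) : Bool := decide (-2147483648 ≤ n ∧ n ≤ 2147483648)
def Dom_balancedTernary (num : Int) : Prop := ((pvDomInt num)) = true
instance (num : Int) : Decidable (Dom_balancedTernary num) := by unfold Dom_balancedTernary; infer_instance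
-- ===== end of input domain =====

-- B fuses base-3 digit extraction and the signed summation into one arithmetic
-- loop (no intermediate string); same return value, objective: simpler.

-- ===== PORT A =====
-- baseConvert's while loop: n ≥ 0 at every call (A returns "" for num < 0 before
-- looping), so Nat `%`/`/` coincide with Python's `%`/`//` here.
def bcLoop (n : Nat) (s : List Char) : List Char :=
  let r := n % 3
  let s' := ("0123456789abcdefghijklmnopqrstuvwxyz".toList).getD r ' ' :: s
  let n' := n / 3
  if _h : n' = 0 then s' else bcLoop n' s'
termination_by n
decreasing_by exact Nat.div_lt_self (by omega) (by omega)

-- baseConvert num 3: "" when num < 0 (base is the literal 3, in range; num is Int already)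
def baseConvert3 (num : Int) : List Char :=
  if num < 0 then [] else bcLoop num.toNat []

-- the for-loop of balancedTernary over ternary[::-1]
def sumLoop : List Char → Int → Int → Int
  | [], total, _ => total
  | d :: rest, total, base =>
    let t1 := if d = '1' then total + base else total
    let t2 := if d = '2' then t1 - base else t1
    sumLoop rest t2 (base * 3)

def balancedTernary (num : Int) : Int :=
  sumLoop ((baseConvert3 num).reverse) 0 1

-- ===== PORT B =====
def altLoop (n : Nat) (total base : Int) : Int :=
  if _h : n = 0 then total
  else
    let r := n % 3
    let t := if r = 1 then total + base else if r = 2 then total - base else total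
    altLoop (n / 3) t (base * 3)
termination_by n
decreasing_by exact Nat.div_lt_self (by omega) (by omega)

def balancedTernary_alt (num : Int) : Int :=
  if num < 0 then 0 else altLoop num.toNat 0 1

-- ===== PRECONDITION & SPEC =====
def Spec_balancedTernary (num : Int) (out : Int) : Prop := out = balancedTernary_alt num
instance (num : Int) (out : Int) : Decidable (Spec_balancedTernary num out) := by unfold Spec_balancedTernary; infer_instance

-- ===== CLAIM (what is proved, stated in full; the proofs are below) =====
def Claim_equal_balancedTernary : Prop := ∀ (num : Int), Dom_balancedTernary num → Spec_balancedTernary num (balancedTernary num)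

-- ===== LEMMAS AND PROOFS =====

lemma bcLoop_append (n : Nat) : ∀ s, bcLoop n s = bcLoop n [] ++ s := by
  induction n using Nat.strong_induction_on with
  | _ n ih =>
    intro s
    conv_lhs => rw [bcLoop]
    conv_rhs => rw [bcLoop]
    by_cases h : n / 3 = 0
    · simp [h]
    · simp only [h, dif_neg, not_false_iff]
      rw [ih (n / 3) (Nat.div_lt_self (by omega) (by omega)),
          ih (n / 3) (Nat.div_lt_self (by omega) (by omega))
            (("0123456789abcdefghijklmnopqrstuvwxyz".toList).getD (n % 3) ' ' :: [])]
      simp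

lemma main_lemma (n : Nat) : ∀ total base,
    sumLoop ((bcLoop n []).reverse) total base = altLoop n total base := by
  induction n using Nat.strong_induction_on with
  | _ n ih =>
    intro total base
    rw [bcLoop]
    by_cases hz : n = 0
    · subst hz; simp [sumLoop, altLoop]
    · rw [altLoop, dif_neg hz]
      have hr : n % 3 = 0 ∨ n % 3 = 1 ∨ n % 3 = 2 := by omega
      by_cases h : n / 3 = 0
      · simp only [h, dif_pos]
        rw [altLoop, dif_pos rfl]
        rcases hr with hr | hr | hr <;> simp [hr, sumLoop]
      · simp only [h, dif_neg, not_false_iff]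
        rw [bcLoop_append]
        simp only [List.reverse_append, List.reverse_cons, List.reverse_nil,
          List.nil_append, List.cons_append]
        rcases hr with hr | hr | hr <;>
          simp [hr, sumLoop, ih (n / 3) (Nat.div_lt_self (by omega) (by omega))]

-- ===== VERDICT (by name: the statement is the Claim_ definition above) =====
theorem balancedTernary_spec : Claim_equal_balancedTernary := by
  intro num _
  unfold Spec_balancedTernary balancedTernary balancedTernary_alt baseConvert3
  by_cases h : num < 0
  · simp [h, sumLoop]
  · simp [h, main_lemma]
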